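-- pv_equiv track=rewrite | github.com/BTCElectrician/ohmni-oracle-v3 | services/extraction/mechanical.py | _prioritize_mechanical_tables
-- ===== SOURCE A (Python) =====
-- from typing import List, Dict, Any, Optional
--
-- def _prioritize_mechanical_tables(
--     tables: List[Dict[str, Any]]
-- ) -> List[Dict[str, Any]]:
--     """Prioritize mechanical tables - equipment schedules first."""
--     # Simple heuristic - look for equipment-related terms
--     equipment_tables = []
--     other_tables = []
--
--     for table in tables:
--         content = table.get("content", "").lower()
--         if any(term in content for term in ["equipment", "hvac", "cfm", "tonnage"]):
--             equipment_tables.append(table)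
--         else:
--             other_tables.append(table)
--
--     return equipment_tables + other_tables
-- ===== SOURCE B (Python) =====
-- from typing import List, Dict, Any, Optional
--
-- def _prioritize_mechanical_tables(
--     tables: List[Dict[str, Any]]
-- ) -> List[Dict[str, Any]]:
--     """Prioritize mechanical tables - equipment schedules first."""
--     def _key(table):
--         content = table.get("content", "").lower()
--         return 0 if any(term in content for term in ["equipment", "hvac", "cfm", "tonnage"]) else 1
--     return sorted(tables, key=_key)
-- ===== Notes on version B (the rewrite author's own statement) =====
-- stated objective: idiomatic
-- what changed: Replaces the two-accumulator partition loop with a single stable sorted() call keyed by a 0/1 equipment-term priority; stability preserves within-group order so the output is identical.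
import Mathlib
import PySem

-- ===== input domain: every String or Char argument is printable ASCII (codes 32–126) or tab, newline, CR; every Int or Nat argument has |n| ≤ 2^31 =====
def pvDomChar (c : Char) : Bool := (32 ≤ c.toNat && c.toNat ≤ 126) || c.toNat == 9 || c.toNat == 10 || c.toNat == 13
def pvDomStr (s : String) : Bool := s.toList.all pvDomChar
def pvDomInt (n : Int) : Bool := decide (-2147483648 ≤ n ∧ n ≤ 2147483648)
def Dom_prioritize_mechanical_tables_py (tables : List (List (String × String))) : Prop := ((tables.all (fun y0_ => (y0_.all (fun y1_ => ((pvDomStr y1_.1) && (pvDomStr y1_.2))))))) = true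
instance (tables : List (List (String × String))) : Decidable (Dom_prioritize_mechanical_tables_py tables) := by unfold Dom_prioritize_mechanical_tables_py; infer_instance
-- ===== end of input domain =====

-- B replaces A's partition-into-two-lists loop by one stable sort on a 0/1 priority key (objective: idiomatic).
-- ===== PORT A =====
def prioritize_mechanical_tables_py (tables : List (List (String × String))) : List (List (String × String)) :=
  let r := tables.foldl (fun (acc : List (List (String × String)) × List (List (String × String))) table =>
    let content := PySem.Str.lower (PySem.Dict.getD ⟨table⟩ "content" "")
    if ["equipment", "hvac", "cfm", "tonnage"].any (fun term => PySem.Str.isIn term content) then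
      (acc.1 ++ [table], acc.2)
    else
      (acc.1, acc.2 ++ [table])) ([], [])
  r.1 ++ r.2

-- ===== PORT B =====
-- B's sort key: 0 for tables whose lowered content contains an equipment term, else 1
def pvKeyB (table : List (String × String)) : Int :=
  let content := PySem.Str.lower (PySem.Dict.getD ⟨table⟩ "content" "")
  if ["equipment", "hvac", "cfm", "tonnage"].any (fun term => PySem.Str.isIn term content) then 0 else 1

def prioritize_mechanical_tables_py_alt (tables : List (List (String × String))) : List (List (String × String)) :=
  PySem.List.sorted tables pvKeyB false

-- ===== PRECONDITION & SPEC =====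
def Spec_prioritize_mechanical_tables_py (tables : List (List (String × String))) (out : List (List (String × String))) : Prop := out = prioritize_mechanical_tables_py_alt tables
instance (tables : List (List (String × String))) (out : List (List (String × String))) : Decidable (Spec_prioritize_mechanical_tables_py tables out) := by unfold Spec_prioritize_mechanical_tables_py; infer_instance

-- ===== CLAIM (what is proved, stated in full; the proofs are below) =====
def Claim_equal_prioritize_mechanical_tables_py : Prop := ∀ (tables : List (List (String × String))), Dom_prioritize_mechanical_tables_py tables → Spec_prioritize_mechanical_tables_py tables (prioritize_mechanical_tables_py tables)

-- ===== LEMMAS AND PROOFS =====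
-- the predicate 'this table is equipment-related', shared by the correctness argument
def pvIsEquip (table : List (String × String)) : Bool :=
  ["equipment", "hvac", "cfm", "tonnage"].any
    (fun term => PySem.Str.isIn term (PySem.Str.lower (PySem.Dict.getD ⟨table⟩ "content" "")))

theorem pvKeyB_eq (t : List (String × String)) : pvKeyB t = if pvIsEquip t then 0 else 1 := rfl

-- A's pair-accumulator loop is a partition (stated for any Bool predicate)
theorem pvA_fold {α : Type} (p : α → Bool) (l : List α) (E O : List α) :
    l.foldl (fun acc x => if p x then (acc.1 ++ [x], acc.2) else (acc.1, acc.2 ++ [x])) (E, O)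
      = (E ++ l.filter p, O ++ l.filter (fun t => !p t)) := by
  induction l generalizing E O with
  | nil => simp
  | cons x xs ih =>
    by_cases h : p x <;> simp [h, ih]

-- inserting a key-0 element into (all-key-0) ++ (all-key-1) lands between the groups
theorem pvInsert0 (x : List (String × String)) (E O : List (List (String × String)))
    (hE : ∀ e ∈ E, pvKeyB e = 0) (hO : ∀ o ∈ O, pvKeyB o = 1) (hx : pvKeyB x = 0) :
    PySem.List.insertBy (fun a b => decide (pvKeyB a < pvKeyB b)) x (E ++ O)
      = E ++ x :: O := by
  induction E with
  | nil =>
    cases O with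
    | nil => simp [PySem.List.insertBy]
    | cons o os =>
      have : pvKeyB o = 1 := hO o (by simp)
      simp [PySem.List.insertBy, hx, this]
  | cons e es ih =>
    have he : pvKeyB e = 0 := hE e (by simp)
    simp only [List.cons_append, PySem.List.insertBy, hx, he]
    simp only [lt_self_iff_false, decide_false, Bool.false_eq_true, if_false, List.cons.injEq,
      true_and]
    exact ih (fun a ha => hE a (by simp [ha]))

-- the insertion-sort fold keeps the "equipment block ++ other block" invariant
theorem pvSort_fold (xs : List (List (String × String)))
    (E O : List (List (String × String)))
    (hE : ∀ e ∈ E, pvKeyB e = 0) (hO : ∀ o ∈ O, pvKeyB o = 1) :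
    xs.foldl (fun acc x => PySem.List.insertBy (fun a b => decide (pvKeyB a < pvKeyB b)) x acc) (E ++ O)
      = (E ++ xs.filter pvIsEquip) ++ (O ++ xs.filter (fun t => !pvIsEquip t)) := by
  induction xs generalizing E O with
  | nil => simp
  | cons x xs ih =>
    by_cases h : pvIsEquip x
    · have hx : pvKeyB x = 0 := by simp [pvKeyB_eq, h]
      have hE' : ∀ a ∈ E ++ [x], pvKeyB a = 0 := by
        intro a ha
        rcases List.mem_append.mp ha with h' | h'
        · exact hE a h'
        · simp at h'; simp [h', hx]
      rw [List.foldl_cons, pvInsert0 x E O hE hO hx,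
        show E ++ x :: O = (E ++ [x]) ++ O by simp, ih (E ++ [x]) O hE' hO]
      simp [h, List.append_assoc]
    · have hx : pvKeyB x = 1 := by simp [pvKeyB_eq, h]
      have hall : ∀ y ∈ E ++ O, (decide (pvKeyB x < pvKeyB y)) = false := by
        intro y hy
        rcases List.mem_append.mp hy with h' | h'
        · simp [hx, hE y h']
        · simp [hx, hO y h']
      have hO' : ∀ a ∈ O ++ [x], pvKeyB a = 1 := by
        intro a ha
        rcases List.mem_append.mp ha with h' | h'
        · exact hO a h'
        · simp at h'; simp [h', hx]
      rw [List.foldl_cons, PySem.List.insertBy_of_forall_not_before _ _ _ hall,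
        show (E ++ O) ++ [x] = E ++ (O ++ [x]) by simp, ih E (O ++ [x]) hE hO']
      simp [h, List.append_assoc]

-- ===== VERDICT (by name: the statement is the Claim_ definition above) =====
theorem prioritize_mechanical_tables_py_spec : Claim_equal_prioritize_mechanical_tables_py := by
  intro tables _
  show prioritize_mechanical_tables_py tables = prioritize_mechanical_tables_py_alt tables
  have hA : prioritize_mechanical_tables_py tables
      = (tables.foldl (fun acc x => if pvIsEquip x then (acc.1 ++ [x], acc.2)
          else (acc.1, acc.2 ++ [x])) ([], [])).1
        ++ (tables.foldl (fun acc x => if pvIsEquip x then (acc.1 ++ [x], acc.2)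
          else (acc.1, acc.2 ++ [x])) ([], [])).2 := rfl
  rw [hA, pvA_fold, prioritize_mechanical_tables_py_alt, PySem.List.sorted_eq_foldl_insertBy]
  have := pvSort_fold tables [] [] (by simp) (by simp)
  simp only [List.nil_append] at this ⊢
  rw [this]
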